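-- pv_equiv track=rewrite | github.com/Digital-101/Tech-Interviews | 50/square_submatrix.py | largest_square_submatrix
-- ===== SOURCE A (Python) =====
-- def largest_square_submatrix(matrix):
--     if not matrix or not matrix[0]:
--         return 0
--
--     rows = len(matrix)
--     cols = len(matrix[0])
--     max_side = 0
--
--     # Create a DP table to store the size of the largest square submatrix ending at each cell
--     dp = [[0] * cols for _ in range(rows)]
--
--     for i in range(rows):
--         for j in range(cols):
--             if matrix[i][j] == 1:
--                 if i == 0 or j == 0:
--                     dp[i][j] = 1
--                 else:
--                     dp[i][j] = min(dp[i-1][j], dp[i][j-1], dp[i-1][j-1]) + 1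
--                 max_side = max(max_side, dp[i][j])
--
--     return max_side
-- ===== SOURCE B (Python) =====
-- def largest_square_submatrix(matrix):
--     if not matrix or not matrix[0]:
--         return 0
--     rows, cols = len(matrix), len(matrix[0])
--     # integral image: S[a][b] = number of ones among matrix[x][y] for x < a, y < b
--     S = [[0] * (cols + 1)]
--     for i in range(rows):
--         prev = S[-1]
--         cur = [0]
--         run = 0
--         for j in range(cols):
--             run += 1 if matrix[i][j] == 1 else 0
--             cur.append(prev[j + 1] + run)
--         S.append(cur)
--     # the largest square with bottom-right (i, j) is at most one bigger than the one
--     # at (i-1, j-1), so scanning row-major the answer grows by at most 1 per cell: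
--     # only the (best+1)-sized square ever needs to be tested, in O(1) via S.
--     best = 0
--     for i in range(rows):
--         for j in range(cols):
--             k = best + 1
--             if k <= i + 1 and k <= j + 1:
--                 area = S[i + 1][j + 1] - S[i + 1 - k][j + 1] - S[i + 1][j + 1 - k] + S[i + 1 - k][j + 1 - k]
--                 if area == k * k:
--                     best = k
--     return best
-- ===== Notes on version B (the rewrite author's own statement) =====
-- stated objective: alternative
-- what changed: B replaces A's min-recurrence DP table by an integral image (2D prefix sums of the ones-indicator) plus a single scan in which the best side can grow by at most one per cell, so each cell tests only the (best+1)-sized square with four O(1) table lookups.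
import Mathlib
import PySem

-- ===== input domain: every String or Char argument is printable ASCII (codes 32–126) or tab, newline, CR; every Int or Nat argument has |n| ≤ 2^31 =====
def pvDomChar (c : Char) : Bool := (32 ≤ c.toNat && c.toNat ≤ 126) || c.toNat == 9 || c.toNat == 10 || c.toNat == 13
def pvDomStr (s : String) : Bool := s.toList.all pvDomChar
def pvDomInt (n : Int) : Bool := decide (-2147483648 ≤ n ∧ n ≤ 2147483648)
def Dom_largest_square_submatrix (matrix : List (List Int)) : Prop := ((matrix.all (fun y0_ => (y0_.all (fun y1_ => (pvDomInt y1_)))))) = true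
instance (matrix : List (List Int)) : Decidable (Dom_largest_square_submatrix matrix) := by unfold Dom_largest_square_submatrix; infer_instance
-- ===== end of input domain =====

-- B replaces A's min-recurrence DP table by an integral image (2D prefix sums of the
-- ones-indicator) plus a single scan in which the best side grows by at most one per
-- cell, tested with four table lookups; objective: alternative.

-- ===== PORT A =====
-- inner-loop body of A: one step of the j-loop at row index i (reads/writes the 2D table dp)
def pvStepA (matrix : List (List Int)) (i : Nat) (st : List (List Int) × Int) (j : Nat) : List (List Int) × Int :=
  let dp := st.1
  if (matrix.getD i []).getD j 0 == 1 then
    let v : Int :=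
      if i = 0 ∨ j = 0 then 1
      else min (min ((dp.getD (i-1) []).getD j 0) ((dp.getD i []).getD (j-1) 0))
               ((dp.getD (i-1) []).getD (j-1) 0) + 1
    (dp.set i ((dp.getD i []).set j v), max st.2 v)
  else st

-- body of A's outer i-loop: run the j-loop over range(cols)
def pvRowA (matrix : List (List Int)) (cols : Nat) (st : List (List Int) × Int) (i : Nat) : List (List Int) × Int :=
  (List.range cols).foldl (pvStepA matrix i) st

def largest_square_submatrix (matrix : List (List Int)) : Int :=
  if matrix = [] ∨ matrix.headD [] = [] then 0
  else
    let rows := matrix.length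
    let cols := (matrix.headD []).length
    let dp := List.replicate rows (List.replicate cols (0 : Int))
    ((List.range rows).foldl (pvRowA matrix cols) (dp, 0)).2

-- ===== PORT B =====
-- inner j-loop of the integral-image pass: state (cur, run)
def pvStepS (mrow : List Int) (prev : List Int) (st : List Int × Int) (j : Nat) : List Int × Int :=
  let run := st.2 + (if mrow.getD j 0 == 1 then 1 else 0)
  (st.1 ++ [prev.getD (j+1) 0 + run], run)

-- one row of the integral image, built by appending
def pvRowS (mrow : List Int) (cols : Nat) (prev : List Int) : List Int :=
  ((List.range cols).foldl (pvStepS mrow prev) ([0], 0)).1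

-- the full integral image S (rows+1 × cols+1), built row by row (prev = S[-1])
def pvBuildS (matrix : List (List Int)) (rows cols : Nat) : List (List Int) :=
  (List.range rows).foldl
    (fun S i => S ++ [pvRowS (matrix.getD i []) cols (S.getD (S.length - 1) [])])
    [List.replicate (cols+1) (0 : Int)]

def pvGetS (S : List (List Int)) (a b : Nat) : Int := (S.getD a []).getD b 0

-- one cell of the scan: test only the (best+1)-sized square, via four lookups in S
def pvStepScan (S : List (List Int)) (i : Nat) (best : Int) (j : Nat) : Int :=
  let k := best + 1
  if k ≤ (i : Int) + 1 ∧ k ≤ (j : Int) + 1 then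
    let area := pvGetS S (i+1) (j+1) - pvGetS S (((i:Int)+1-k).toNat) (j+1)
              - pvGetS S (i+1) (((j:Int)+1-k).toNat) + pvGetS S (((i:Int)+1-k).toNat) (((j:Int)+1-k).toNat)
    if area = k * k then k else best
  else best

def largest_square_submatrix_alt (matrix : List (List Int)) : Int :=
  if matrix = [] ∨ matrix.headD [] = [] then 0
  else
    let rows := matrix.length
    let cols := (matrix.headD []).length
    let S := pvBuildS matrix rows cols
    (List.range rows).foldl (fun best i => (List.range cols).foldl (pvStepScan S i) best) 0

-- ===== PRECONDITION & SPEC =====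
-- Pre_ excludes exactly the ragged matrices with a row shorter than the first row,
-- on which A (and B alike) raises IndexError.
def Pre_largest_square_submatrix (matrix : List (List Int)) : Prop :=
  ∀ row ∈ matrix, (matrix.headD []).length ≤ row.length
instance (matrix : List (List Int)) : Decidable (Pre_largest_square_submatrix matrix) := by
  unfold Pre_largest_square_submatrix; infer_instance

def pvWitness_largest_square_submatrix : List (List Int) := [[1, 1], [1, 1]]

def Spec_largest_square_submatrix (matrix : List (List Int)) (out : Int) : Prop := out = largest_square_submatrix_alt matrix
instance (matrix : List (List Int)) (out : Int) : Decidable (Spec_largest_square_submatrix matrix out) := by unfold Spec_largest_square_submatrix; infer_instance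

-- ===== CLAIM (what is proved, stated in full; the proofs are below) =====
def Claim_equal_largest_square_submatrix : Prop := ∀ (matrix : List (List Int)), Dom_largest_square_submatrix matrix → Pre_largest_square_submatrix matrix → Spec_largest_square_submatrix matrix (largest_square_submatrix matrix)

-- ===== LEMMAS AND PROOFS =====

-- ---------- generic list-index helpers ----------
theorem pvGetD_append_len {α : Type} (xs ys : List α) (k : Nat) (d : α) :
    (xs ++ ys).getD (xs.length + k) d = ys.getD k d := by
  simp [List.getD_eq_getElem?_getD,
        List.getElem?_append_right (show xs.length ≤ xs.length + k by omega)]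

theorem pvGetD_append_self {α : Type} (xs ys : List α) (d : α) :
    (xs ++ ys).getD xs.length d = ys.getD 0 d := by
  simpa using pvGetD_append_len xs ys 0 d

theorem pvSet_append_len {α : Type} (xs ys : List α) (k : Nat) (v : α) :
    (xs ++ ys).set (xs.length + k) v = xs ++ ys.set k v := by
  rw [List.set_append]; simp

theorem pvSet_append_self {α : Type} (xs ys : List α) (v : α) :
    (xs ++ ys).set xs.length v = xs ++ ys.set 0 v := by
  simpa using pvSet_append_len xs ys 0 v

theorem pvDrop_cons {row : List Int} {j : Nat} (h : j < row.length) :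
    row.drop j = row.getD j 0 :: row.drop (j+1) := by
  rw [List.drop_eq_getElem_cons h]
  simp [List.getD_eq_getElem?_getD, List.getElem?_eq_getElem h]

-- ---------- the cell predicate / largest-square characterisation ----------
def pvCell (m : List (List Int)) (i j : Nat) : Int := (m.getD i []).getD j 0

def pvBit (c : Int) : Int := if c == 1 then 1 else 0

-- "the k×k square with bottom-right corner (i,j) is all ones"
def pvSqB (m : List (List Int)) (i j k : Nat) : Bool :=
  (List.range k).all (fun a => (List.range k).all (fun b => pvCell m (i-a) (j-b) == 1))

def pvP (m : List (List Int)) (i j k : Nat) : Bool :=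
  decide (k ≤ i+1) && decide (k ≤ j+1) && pvSqB m i j k

-- size of the largest all-ones square with bottom-right corner (i,j)
def pvF (m : List (List Int)) (i j : Nat) : Nat :=
  Nat.findGreatest (fun k => pvP m i j k = true) (min i j + 1)

-- ---------- counting ----------
def pvRowCnt (m : List (List Int)) (i b : Nat) : Int :=
  ((List.range b).map (fun y => pvBit (pvCell m i y))).sum

def pvCnt (m : List (List Int)) (a b : Nat) : Int :=
  ((List.range a).map (fun x => pvRowCnt m x b)).sum

def pvBlock (m : List (List Int)) (i j k : Nat) : Int :=
  ((List.range k).map (fun t => ((List.range k).map (fun s => pvBit (pvCell m (i+1-k+t) (j+1-k+s)))).sum)).sum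

-- ---------- row-major prefix maximum of pvF ----------
def pvPref (m : List (List Int)) (cols i j : Nat) : Int :=
  (((List.range i).flatMap (fun x => (List.range cols).map (fun y => (pvF m x y : Int)))) ++
    (List.range j).map (fun y => (pvF m i y : Int))).foldl max 0

-- ---------- common structural spec of A's DP rows (from A's recurrence) ----------
def pvRowGo : List Int → List Int → Int → Int → List Int
  | c :: rs, p :: ps, diag, left =>
      (if c == 1 then min (min p left) diag + 1 else 0) ::
        pvRowGo rs ps p (if c == 1 then min (min p left) diag + 1 else 0)
  | _, _, _, _ => []

def pvRowFn : List Int → List Int → List Int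
  | c :: rs, p :: ps => pvBit c :: pvRowGo rs ps p (pvBit c)
  | _, _ => []

def pvSpecRows : List (List Int) → List Int → Int → Int
  | [], _, m => m
  | r :: rs, prev, m => pvSpecRows rs (pvRowFn r prev) ((pvRowFn r prev).foldl max m)

-- ---------- max-fold helpers ----------
theorem pvFoldMax_init (l : List Int) (m : Int) : m ≤ l.foldl max m := by
  induction l generalizing m with
  | nil => simp
  | cons x l ih => exact le_trans (le_max_left m x) (ih (max m x))

theorem pvFoldMax_mem (l : List Int) (m x : Int) (hx : x ∈ l) : x ≤ l.foldl max m := by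
  induction l generalizing m with
  | nil => simp at hx
  | cons y l ih =>
      rcases List.mem_cons.1 hx with rfl | hx
      · exact le_trans (le_max_right m x) (pvFoldMax_init l (max m x))
      · exact ih (max m y) hx

theorem pvFoldlMax_nonneg : ∀ (l : List Int) (m : Int), 0 ≤ m → 0 ≤ l.foldl max m := by
  intro l m hm; exact le_trans hm (pvFoldMax_init l m)

-- ---------- pvPref lemmas ----------
theorem pvPref_zero (m : List (List Int)) (cols : Nat) : pvPref m cols 0 0 = 0 := by
  simp [pvPref]

theorem pvPref_nonneg (m : List (List Int)) (cols i j : Nat) : 0 ≤ pvPref m cols i j :=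
  pvFoldlMax_nonneg _ 0 le_rfl

theorem pvPref_succ (m : List (List Int)) (cols i j : Nat) :
    pvPref m cols i (j+1) = max (pvPref m cols i j) ((pvF m i j : Int)) := by
  unfold pvPref
  rw [List.range_succ, List.map_append, ← List.append_assoc, List.foldl_append]
  simp

theorem pvPref_roll (m : List (List Int)) (cols i : Nat) :
    pvPref m cols (i+1) 0 = pvPref m cols i cols := by
  unfold pvPref
  rw [List.range_succ, List.flatMap_append]
  simp

theorem pvPref_fold (m : List (List Int)) (cols i : Nat) :
    ∀ (n j : Nat), ((List.range' j n).map (fun y => (pvF m i y : Int))).foldl max (pvPref m cols i j)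
      = pvPref m cols i (j+n) := by
  intro n
  induction n with
  | zero => intro j; simp
  | succ n ih =>
      intro j
      rw [show j + (n+1) = (j+1) + n from by omega, ← ih (j+1)]
      rw [List.range'_succ]
      simp only [List.map_cons, List.foldl_cons]
      congr 1
      rw [pvPref_succ]

theorem pvPref_ge_prev (m : List (List Int)) (cols i j x y : Nat) (hx : x < i) (hy : y < cols) :
    (pvF m x y : Int) ≤ pvPref m cols i j := by
  apply pvFoldMax_mem
  apply List.mem_append_left
  simp only [List.mem_flatMap, List.mem_map, List.mem_range]
  exact ⟨x, hx, y, hy, rfl⟩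

-- ---------- pvSqB / pvF lemmas ----------
theorem pvSqB_iff (m : List (List Int)) (i j k : Nat) :
    pvSqB m i j k = true ↔ ∀ a < k, ∀ b < k, pvCell m (i-a) (j-b) = 1 := by
  simp [pvSqB, List.all_eq_true, List.mem_range]

theorem pvSqB_mono (m : List (List Int)) (i j : Nat) {k k' : Nat} (h : k' ≤ k)
    (hk : pvSqB m i j k = true) : pvSqB m i j k' = true := by
  rw [pvSqB_iff] at *
  intro a ha b hb
  exact hk a (by omega) b (by omega)

theorem pvSqB_decomp (m : List (List Int)) (i j k : Nat) :
    pvSqB m (i+1) (j+1) (k+1) = true ↔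
      pvCell m (i+1) (j+1) = 1 ∧ pvSqB m i (j+1) k = true ∧ pvSqB m (i+1) j k = true ∧
        pvSqB m i j k = true := by
  simp only [pvSqB_iff]
  constructor
  · intro h
    refine ⟨by simpa using h 0 (by omega) 0 (by omega), ?_, ?_, ?_⟩
    · intro a ha b hb
      have := h (a+1) (by omega) b (by omega)
      rwa [show i+1-(a+1) = i-a from by omega] at this
    · intro a ha b hb
      have := h a (by omega) (b+1) (by omega)
      rwa [show j+1-(b+1) = j-b from by omega] at this
    · intro a ha b hb
      have := h (a+1) (by omega) (b+1) (by omega)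
      rwa [show i+1-(a+1) = i-a from by omega, show j+1-(b+1) = j-b from by omega] at this
  · rintro ⟨hc, h1, h2, h3⟩ a ha b hb
    rcases a with _ | a <;> rcases b with _ | b
    · simpa using hc
    · simpa using h2 0 (by omega) b (by omega)
    · simpa using h1 a (by omega) 0 (by omega)
    · simpa using h3 a (by omega) b (by omega)

theorem pvP_zero (m : List (List Int)) (i j : Nat) : pvP m i j 0 = true := by
  simp [pvP, pvSqB]

theorem pvF_le (m : List (List Int)) (i j : Nat) : pvF m i j ≤ min i j + 1 :=
  Nat.findGreatest_le _

theorem pvF_P (m : List (List Int)) (i j : Nat) : pvP m i j (pvF m i j) = true := by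
  unfold pvF
  exact Nat.findGreatest_spec (P := fun k => pvP m i j k = true) (Nat.zero_le _) (pvP_zero m i j)

theorem pvF_ge (m : List (List Int)) (i j k : Nat) (hk : pvP m i j k = true)
    (hb : k ≤ min i j + 1) : k ≤ pvF m i j :=
  Nat.le_findGreatest hb hk

theorem pvF_eq_of (m : List (List Int)) (i j t : Nat) (ht : pvP m i j t = true)
    (hb : t ≤ min i j + 1) (hg : ∀ k, t < k → k ≤ min i j + 1 → pvP m i j k = false) :
    pvF m i j = t := by
  refine le_antisymm ?_ (pvF_ge m i j t ht hb)
  by_contra h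
  push_neg at h
  have h1 := pvF_P m i j
  have h2 := hg (pvF m i j) h (pvF_le m i j)
  rw [h1] at h2; cases h2

theorem pvF_bounds (m : List (List Int)) (i j : Nat) : pvF m i j ≤ i + 1 ∧ pvF m i j ≤ j + 1 := by
  have h := pvF_P m i j
  simp only [pvP, Bool.and_eq_true, decide_eq_true_eq] at h
  exact ⟨h.1.1, h.1.2⟩

theorem pvF_sq (m : List (List Int)) (i j : Nat) : pvSqB m i j (pvF m i j) = true := by
  have h := pvF_P m i j
  simp only [pvP, Bool.and_eq_true] at h
  exact h.2

theorem pvF_of_ne (m : List (List Int)) (i j : Nat) (h : pvCell m i j ≠ 1) : pvF m i j = 0 := by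
  refine pvF_eq_of m i j 0 (pvP_zero m i j) (by omega) ?_
  intro k hk _
  rcases Bool.eq_false_or_eq_true (pvP m i j k) with ht | hf
  · exfalso
    simp only [pvP, Bool.and_eq_true] at ht
    have := (pvSqB_iff m i j k).1 ht.2 0 (by omega) 0 (by omega)
    simp only [Nat.sub_zero] at this
    exact h this
  · exact hf

theorem pvF_edge (m : List (List Int)) (i j : Nat) (h : pvCell m i j = 1) (he : i = 0 ∨ j = 0) :
    pvF m i j = 1 := by
  refine pvF_eq_of m i j 1 ?_ (by omega) ?_
  · simp only [pvP, Bool.and_eq_true, decide_eq_true_eq]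
    refine ⟨⟨by omega, by omega⟩, ?_⟩
    rw [pvSqB_iff]
    intro a ha b hb
    have ha0 : a = 0 := by omega
    have hb0 : b = 0 := by omega
    subst ha0; subst hb0
    simpa using h
  · intro k hk hkb
    have hm0 : min i j = 0 := by rcases he with rfl | rfl <;> simp
    exact absurd hkb (by omega)

theorem pvF_succ (m : List (List Int)) (i j : Nat) :
    pvF m (i+1) (j+1) =
      if pvCell m (i+1) (j+1) = 1 then
        min (min (pvF m i (j+1)) (pvF m (i+1) j)) (pvF m i j) + 1
      else 0 := by
  by_cases hc : pvCell m (i+1) (j+1) = 1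
  · rw [if_pos hc]
    have hb1 := pvF_bounds m i (j+1)
    have hb2 := pvF_bounds m (i+1) j
    have hb0 := pvF_bounds m i j
    have hle0 := pvF_le m i j
    set t := min (min (pvF m i (j+1)) (pvF m (i+1) j)) (pvF m i j) with ht
    refine pvF_eq_of m (i+1) (j+1) (t+1) ?_ (by omega) ?_
    · simp only [pvP, Bool.and_eq_true, decide_eq_true_eq]
      refine ⟨⟨by omega, by omega⟩, ?_⟩
      rw [pvSqB_decomp]
      exact ⟨hc,
        pvSqB_mono m i (j+1) (show t ≤ pvF m i (j+1) by omega) (pvF_sq m i (j+1)),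
        pvSqB_mono m (i+1) j (show t ≤ pvF m (i+1) j by omega) (pvF_sq m (i+1) j),
        pvSqB_mono m i j (show t ≤ pvF m i j by omega) (pvF_sq m i j)⟩
    · intro k hk hkb
      by_cases hbc : pvP m (i+1) (j+1) k = true
      case neg => simpa using hbc
      have htk := hbc
      exfalso
      simp only [pvP, Bool.and_eq_true, decide_eq_true_eq] at htk
      obtain ⟨⟨hki, hkj⟩, hsq⟩ := htk
      obtain ⟨k', rfl⟩ : ∃ k', k = k'+1 := ⟨k-1, by omega⟩
      rw [pvSqB_decomp] at hsq
      obtain ⟨-, s1, s2, s3⟩ := hsq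
      have g1 : k' ≤ pvF m i (j+1) := by
        refine pvF_ge m i (j+1) k' ?_ (by omega)
        simp only [pvP, Bool.and_eq_true, decide_eq_true_eq]
        exact ⟨⟨by omega, by omega⟩, s1⟩
      have g2 : k' ≤ pvF m (i+1) j := by
        refine pvF_ge m (i+1) j k' ?_ (by omega)
        simp only [pvP, Bool.and_eq_true, decide_eq_true_eq]
        exact ⟨⟨by omega, by omega⟩, s2⟩
      have g3 : k' ≤ pvF m i j := by
        refine pvF_ge m i j k' ?_ (by omega)
        simp only [pvP, Bool.and_eq_true, decide_eq_true_eq]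
        exact ⟨⟨by omega, by omega⟩, s3⟩
      omega
  · rw [if_neg hc]
    exact pvF_of_ne m (i+1) (j+1) hc

theorem pvF_step_le (m : List (List Int)) (i j : Nat) : pvF m (i+1) (j+1) ≤ pvF m i j + 1 := by
  rw [pvF_succ]
  split
  · have : min (min (pvF m i (j+1)) (pvF m (i+1) j)) (pvF m i j) ≤ pvF m i j := min_le_right _ _
    omega
  · omega

-- ---------- sum lemmas ----------
theorem pvSum_nonneg (l : List Int) (h : ∀ x ∈ l, 0 ≤ x) : 0 ≤ l.sum := by
  induction l with
  | nil => simp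
  | cons a l ih =>
      simp only [List.sum_cons]
      have := h a (by simp)
      have := ih (fun x hx => h x (by simp [hx]))
      omega

theorem pvSum_le (l : List Int) (c : Int) (h : ∀ x ∈ l, x ≤ c) : l.sum ≤ (l.length : Int) * c := by
  induction l with
  | nil => simp
  | cons a l ih =>
      simp only [List.sum_cons, List.length_cons]
      have h1 := h a (by simp)
      have h2 := ih (fun x hx => h x (by simp [hx]))
      push_cast
      nlinarith

theorem pvSum_eq_iff (l : List Int) (c : Int) (hc : 0 ≤ c) (h : ∀ x ∈ l, 0 ≤ x ∧ x ≤ c) :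
    l.sum = (l.length : Int) * c ↔ ∀ x ∈ l, x = c := by
  induction l with
  | nil => simp
  | cons a l ih =>
      have h1 := h a (by simp)
      have h2 : ∀ x ∈ l, 0 ≤ x ∧ x ≤ c := fun x hx => h x (by simp [hx])
      have hsle := pvSum_le l c (fun x hx => (h2 x hx).2)
      have hsnn := pvSum_nonneg l (fun x hx => (h2 x hx).1)
      have ihl := ih h2
      simp only [List.sum_cons, List.length_cons, List.mem_cons]
      constructor
      · intro he
        have ha : a = c := by push_cast at he; linarith
        have hs : l.sum = (l.length : Int) * c := by push_cast at he ⊢; linarith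
        intro x hx
        rcases hx with rfl | hx
        · exact ha
        · exact (ihl.mp hs) x hx
      · intro hall
        have ha : a = c := hall a (Or.inl rfl)
        have hs : l.sum = (l.length : Int) * c := ihl.mpr (fun x hx => hall x (Or.inr hx))
        push_cast
        rw [ha, hs]; ring

theorem pvRowCnt_zero (m : List (List Int)) (i : Nat) : pvRowCnt m i 0 = 0 := by simp [pvRowCnt]

theorem pvRowCnt_succ (m : List (List Int)) (i b : Nat) :
    pvRowCnt m i (b+1) = pvRowCnt m i b + pvBit (pvCell m i b) := by
  simp [pvRowCnt, List.range_succ]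

theorem pvCnt_zero (m : List (List Int)) (b : Nat) : pvCnt m 0 b = 0 := by simp [pvCnt]

theorem pvCnt_succ (m : List (List Int)) (a b : Nat) :
    pvCnt m (a+1) b = pvCnt m a b + pvRowCnt m a b := by
  simp [pvCnt, List.range_succ]

theorem pvCnt_b0 (m : List (List Int)) (a : Nat) : pvCnt m a 0 = 0 := by
  induction a with
  | zero => simp [pvCnt]
  | succ a ih => rw [pvCnt_succ, ih, pvRowCnt_zero]; norm_num

theorem pvSum_map_sub {α : Type} (l : List α) (f g : α → Int) :
    (l.map f).sum - (l.map g).sum = (l.map (fun x => f x - g x)).sum := by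
  induction l with
  | nil => simp
  | cons a l ih => simp only [List.map_cons, List.sum_cons]; omega

theorem pvCnt_sub (m : List (List Int)) (b : Nat) :
    ∀ (q p : Nat), pvCnt m (p+q) b - pvCnt m p b = ((List.range q).map (fun t => pvRowCnt m (p+t) b)).sum := by
  intro q
  induction q with
  | zero => intro p; simp
  | succ q ih =>
      intro p
      rw [show p + (q+1) = (p+q)+1 by omega, pvCnt_succ, List.range_succ]
      simp only [List.map_append, List.sum_append, List.map_cons, List.sum_cons, List.map_nil,
        List.sum_nil]
      have := ih p
      omega

theorem pvRowCnt_sub (m : List (List Int)) (x : Nat) :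
    ∀ (q p : Nat), pvRowCnt m x (p+q) - pvRowCnt m x p = ((List.range q).map (fun s => pvBit (pvCell m x (p+s)))).sum := by
  intro q
  induction q with
  | zero => intro p; simp
  | succ q ih =>
      intro p
      rw [show p + (q+1) = (p+q)+1 by omega, pvRowCnt_succ, List.range_succ]
      simp only [List.map_append, List.sum_append, List.map_cons, List.sum_cons, List.map_nil,
        List.sum_nil]
      have := ih p
      omega

theorem pvArea_eq_block (m : List (List Int)) (i j k : Nat) (hi : k ≤ i+1) (hj : k ≤ j+1) :
    pvCnt m (i+1) (j+1) - pvCnt m (i+1-k) (j+1) - pvCnt m (i+1) (j+1-k) + pvCnt m (i+1-k) (j+1-k)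
      = pvBlock m i j k := by
  have hp : i+1-k + k = i+1 := by omega
  have hq : j+1-k + k = j+1 := by omega
  have h1 := pvCnt_sub m (j+1) k (i+1-k)
  have h2 := pvCnt_sub m (j+1-k) k (i+1-k)
  rw [hp] at h1 h2
  have h3 : pvCnt m (i+1) (j+1) - pvCnt m (i+1-k) (j+1) - pvCnt m (i+1) (j+1-k) + pvCnt m (i+1-k) (j+1-k)
      = ((List.range k).map (fun t => pvRowCnt m (i+1-k+t) (j+1))).sum
        - ((List.range k).map (fun t => pvRowCnt m (i+1-k+t) (j+1-k))).sum := by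
    rw [← h1, ← h2]; ring
  rw [h3, pvSum_map_sub]
  unfold pvBlock
  congr 1
  apply List.map_congr_left
  intro t ht
  have h4 := pvRowCnt_sub m (i+1-k+t) k (j+1-k)
  rw [hq] at h4
  exact h4

theorem pvBit_eq_one_iff (c : Int) : pvBit c = 1 ↔ c = 1 := by
  unfold pvBit; split <;> simp_all

theorem pvBit_nonneg (c : Int) : 0 ≤ pvBit c := by unfold pvBit; split <;> omega

theorem pvBit_le_one (c : Int) : pvBit c ≤ 1 := by unfold pvBit; split <;> omega

theorem pvBlock_eq_iff (m : List (List Int)) (i j k : Nat) (hi : k ≤ i+1) (hj : k ≤ j+1) :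
    (pvBlock m i j k = (k:Int) * k ↔ pvSqB m i j k = true) := by
  have hin : ∀ t : Nat, (((List.range k).map (fun s => pvBit (pvCell m (i+1-k+t) (j+1-k+s)))).sum = (k:Int)
      ↔ ∀ s < k, pvBit (pvCell m (i+1-k+t) (j+1-k+s)) = 1) := by
    intro t
    have := pvSum_eq_iff ((List.range k).map (fun s => pvBit (pvCell m (i+1-k+t) (j+1-k+s)))) 1
      (by omega) (by
        intro x hx
        obtain ⟨s, _, rfl⟩ := List.mem_map.1 hx
        exact ⟨pvBit_nonneg _, pvBit_le_one _⟩)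
    simp only [List.length_map, List.length_range, mul_one] at this
    rw [this]
    constructor
    · intro h s hs
      exact h _ (List.mem_map.2 ⟨s, List.mem_range.2 hs, rfl⟩)
    · intro h x hx
      obtain ⟨s, hs, rfl⟩ := List.mem_map.1 hx
      exact h s (List.mem_range.1 hs)
  have hout := pvSum_eq_iff
    ((List.range k).map (fun t => ((List.range k).map (fun s => pvBit (pvCell m (i+1-k+t) (j+1-k+s)))).sum))
    (k:Int) (by omega) (by
      intro x hx
      obtain ⟨t, _, rfl⟩ := List.mem_map.1 hx
      constructor
      · exact pvSum_nonneg _ (by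
          intro y hy
          obtain ⟨s, _, rfl⟩ := List.mem_map.1 hy
          exact pvBit_nonneg _)
      · have := pvSum_le ((List.range k).map (fun s => pvBit (pvCell m (i+1-k+t) (j+1-k+s)))) 1 (by
          intro y hy
          obtain ⟨s, _, rfl⟩ := List.mem_map.1 hy
          exact pvBit_le_one _)
        simpa using this)
  simp only [List.length_map, List.length_range] at hout
  unfold pvBlock
  rw [hout, pvSqB_iff]
  constructor
  · intro h a ha b hb
    have := (hin (k-1-a)).1 (h _ (List.mem_map.2 ⟨k-1-a, List.mem_range.2 (by omega), rfl⟩)) (k-1-b) (by omega)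
    rw [pvBit_eq_one_iff] at this
    rwa [show i+1-k+(k-1-a) = i-a from by omega, show j+1-k+(k-1-b) = j-b from by omega] at this
  · intro h x hx
    obtain ⟨t, ht, rfl⟩ := List.mem_map.1 hx
    have ht' := List.mem_range.1 ht
    apply (hin t).2
    intro s hs
    rw [pvBit_eq_one_iff]
    have := h (k-1-t) (by omega) (k-1-s) (by omega)
    rwa [show i-(k-1-t) = i+1-k+t from by omega, show j-(k-1-s) = j+1-k+s from by omega] at this

-- ---------- S-table correctness ----------
def pvSRow (m : List (List Int)) (cols a : Nat) : List Int :=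
  (List.range (cols+1)).map (fun b => pvCnt m a b)

theorem pvSRow_getD (m : List (List Int)) (cols a b : Nat) (hb : b ≤ cols) :
    (pvSRow m cols a).getD b 0 = pvCnt m a b := by
  unfold pvSRow
  rw [List.getD_eq_getElem?_getD]
  rw [List.getElem?_map]
  simp [List.getElem?_range (show b < cols+1 by omega)]

theorem pvSRow_zero (m : List (List Int)) (cols : Nat) :
    pvSRow m cols 0 = List.replicate (cols+1) 0 := by
  unfold pvSRow
  rw [List.eq_replicate_iff]
  constructor
  · simp
  · intro x hx
    simp only [List.mem_map] at hx
    obtain ⟨b, _, rfl⟩ := hx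
    exact pvCnt_zero m b

theorem pvRowS_inner (m : List (List Int)) (cols i : Nat) :
    ∀ (n j : Nat), j + n ≤ cols →
      (List.range' j n).foldl (pvStepS (m.getD i []) (pvSRow m cols i))
        ((List.range (j+1)).map (fun b => pvCnt m (i+1) b), pvRowCnt m i j)
      = ((List.range (j+n+1)).map (fun b => pvCnt m (i+1) b), pvRowCnt m i (j+n)) := by
  intro n
  induction n with
  | zero => intro j _; simp
  | succ n ih =>
      intro j hjn
      rw [List.range'_succ, List.foldl_cons]
      have hstep : pvStepS (m.getD i []) (pvSRow m cols i)
          ((List.range (j+1)).map (fun b => pvCnt m (i+1) b), pvRowCnt m i j) j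
          = ((List.range (j+2)).map (fun b => pvCnt m (i+1) b), pvRowCnt m i (j+1)) := by
        unfold pvStepS
        have hrun : pvRowCnt m i j + (if (m.getD i []).getD j 0 == 1 then 1 else 0)
            = pvRowCnt m i (j+1) := by
          rw [pvRowCnt_succ]; rfl
        simp only [hrun]
        rw [pvSRow_getD m cols i (j+1) (by omega)]
        rw [show pvCnt m i (j+1) + pvRowCnt m i (j+1) = pvCnt m (i+1) (j+1) from (pvCnt_succ m i (j+1)).symm]
        rw [show j+2 = (j+1)+1 from rfl, List.range_succ (n := j+1), List.map_append]
        rfl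
      rw [hstep]
      have := ih (j+1) (by omega)
      rw [show j+(n+1) = (j+1)+n from by omega]
      rw [show j+1+n+1 = (j+1)+n+1 from rfl] at this ⊢
      exact this

theorem pvRowS_spec (m : List (List Int)) (cols i : Nat) :
    pvRowS (m.getD i []) cols (pvSRow m cols i) = pvSRow m cols (i+1) := by
  unfold pvRowS
  rw [List.range_eq_range']
  have hinit : (([(0:Int)], (0:Int)) : List Int × Int)
      = ((List.range (0+1)).map (fun b => pvCnt m (i+1) b), pvRowCnt m i 0) := by
    simp [pvCnt_b0, pvRowCnt_zero]
  rw [hinit, pvRowS_inner m cols i cols 0 (by omega)]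
  simp [pvSRow]

theorem pvBuildS_spec (m : List (List Int)) (cols : Nat) :
    ∀ rows, pvBuildS m rows cols = (List.range (rows+1)).map (pvSRow m cols) := by
  intro rows
  induction rows with
  | zero =>
      unfold pvBuildS
      simp [pvSRow_zero]
  | succ r ih =>
      unfold pvBuildS at ih ⊢
      conv_lhs => rw [List.range_succ (n := r), List.foldl_append]
      rw [ih]
      simp only [List.foldl_cons, List.foldl_nil]
      have hlen : ((List.range (r+1)).map (pvSRow m cols)).length = r+1 := by simp
      rw [hlen]
      have hlast : ((List.range (r+1)).map (pvSRow m cols)).getD (r+1-1) [] = pvSRow m cols r := by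
        rw [List.getD_eq_getElem?_getD, List.getElem?_map]
        simp [List.getElem?_range (show r+1-1 < r+1 by omega)]
      rw [hlast, pvRowS_spec m cols r]
      rw [show r+1+1 = (r+1)+1 from rfl, List.range_succ (n := r+1), List.map_append]
      simp

theorem pvGetS_spec (m : List (List Int)) (rows cols a b : Nat) (ha : a ≤ rows) (hb : b ≤ cols) :
    pvGetS (pvBuildS m rows cols) a b = pvCnt m a b := by
  unfold pvGetS
  rw [pvBuildS_spec]
  have : ((List.range (rows+1)).map (pvSRow m cols)).getD a [] = pvSRow m cols a := by
    rw [List.getD_eq_getElem?_getD, List.getElem?_map]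
    simp [List.getElem?_range (show a < rows+1 by omega)]
  rw [this, pvSRow_getD m cols a b hb]

-- ---------- the scan ----------
theorem pvF_le_pref (m : List (List Int)) (cols i j : Nat) (hj : j < cols) :
    (pvF m i j : Int) ≤ pvPref m cols i j + 1 := by
  have hnn := pvPref_nonneg m cols i j
  cases i with
  | zero =>
      have := pvF_le m 0 j
      simp only [Nat.zero_min] at this
      omega
  | succ i =>
      cases j with
      | zero =>
          have := pvF_le m (i+1) 0
          simp only [Nat.min_zero] at this
          omega
      | succ j =>
          have h1 := pvF_step_le m i j
          have h2 := pvPref_ge_prev m cols (i+1) (j+1) i j (by omega) (by omega)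
          omega

theorem pvScanStep (m : List (List Int)) (rows cols i j : Nat) (hi : i < rows) (hj : j < cols) :
    pvStepScan (pvBuildS m rows cols) i (pvPref m cols i j) j = pvPref m cols i (j+1) := by
  have hM0 : 0 ≤ pvPref m cols i j := pvPref_nonneg m cols i j
  have hfb := pvF_bounds m i j
  have hfle := pvF_le_pref m cols i j hj
  rw [pvPref_succ]
  simp only [pvStepScan]
  by_cases hcond : pvPref m cols i j + 1 ≤ (i:Int) + 1 ∧ pvPref m cols i j + 1 ≤ (j:Int) + 1
  · rw [if_pos hcond]
    obtain ⟨hci, hcj⟩ := hcond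
    have hkex : ∃ kN : Nat, (kN : Int) = pvPref m cols i j + 1 := ⟨(pvPref m cols i j + 1).toNat, by omega⟩
    obtain ⟨kN, hkNc⟩ := hkex
    have hkNi : kN ≤ i+1 := by omega
    have hkNj : kN ≤ j+1 := by omega
    have hidx1 : (((i:Int)+1-(pvPref m cols i j+1)).toNat) = i+1-kN := by omega
    have hidx2 : (((j:Int)+1-(pvPref m cols i j+1)).toNat) = j+1-kN := by omega
    rw [hidx1, hidx2]
    rw [pvGetS_spec m rows cols (i+1) (j+1) (by omega) (by omega),
        pvGetS_spec m rows cols (i+1-kN) (j+1) (by omega) (by omega),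
        pvGetS_spec m rows cols (i+1) (j+1-kN) (by omega) (by omega),
        pvGetS_spec m rows cols (i+1-kN) (j+1-kN) (by omega) (by omega)]
    rw [pvArea_eq_block m i j kN hkNi hkNj]
    by_cases hf : pvF m i j = kN
    · have hsq : pvSqB m i j kN = true := hf ▸ pvF_sq m i j
      have harea : pvBlock m i j kN = (pvPref m cols i j + 1) * (pvPref m cols i j + 1) := by
        have h5 := (pvBlock_eq_iff m i j kN hkNi hkNj).2 hsq
        rw [hkNc] at h5
        exact h5
      rw [if_pos harea]
      rw [max_eq_right (show pvPref m cols i j ≤ (pvF m i j : Int) by omega)]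
      omega
    · have harea : ¬ (pvBlock m i j kN = (pvPref m cols i j + 1) * (pvPref m cols i j + 1)) := by
        intro he
        have hsq : pvSqB m i j kN = true := by
          apply (pvBlock_eq_iff m i j kN hkNi hkNj).1
          rw [he, hkNc]
        have hk_le : kN ≤ pvF m i j := by
          refine pvF_ge m i j kN ?_ (by omega)
          simp only [pvP, Bool.and_eq_true, decide_eq_true_eq]
          exact ⟨⟨hkNi, hkNj⟩, hsq⟩
        omega
      rw [if_neg harea]
      rw [max_eq_left (show (pvF m i j : Int) ≤ pvPref m cols i j by omega)]
  · rw [if_neg hcond]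
    have hle : (pvF m i j : Int) ≤ pvPref m cols i j := by
      rcases not_and_or.1 hcond with h | h <;> omega
    rw [max_eq_left hle]

theorem pvScanRow (m : List (List Int)) (rows cols i : Nat) (hi : i < rows) :
    ∀ (n j : Nat), j + n ≤ cols →
      (List.range' j n).foldl (pvStepScan (pvBuildS m rows cols) i) (pvPref m cols i j)
        = pvPref m cols i (j+n) := by
  intro n
  induction n with
  | zero => intro j _; simp
  | succ n ih =>
      intro j hjn
      rw [List.range'_succ, List.foldl_cons, pvScanStep m rows cols i j hi (by omega)]
      have := ih (j+1) (by omega)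
      rw [this]
      ring_nf

theorem pvScanAll (m : List (List Int)) (rows cols : Nat) :
    ∀ (n r : Nat), r + n ≤ rows →
      (List.range' r n).foldl
        (fun best i => (List.range cols).foldl (pvStepScan (pvBuildS m rows cols) i) best)
        (pvPref m cols r 0)
      = pvPref m cols (r+n) 0 := by
  intro n
  induction n with
  | zero => intro r _; simp
  | succ n ih =>
      intro r hrn
      rw [show r + (n+1) = (r+1) + n from by omega, ← ih (r+1) (by omega)]
      rw [List.range'_succ, List.foldl_cons]
      simp only [List.range_eq_range']
      rw [pvScanRow m rows cols r (by omega) cols 0 (by omega)]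
      rw [show (0 + cols = cols) from by omega, ← pvPref_roll]

-- ---------- reused A-side structural lemmas (dp table → pvSpecRows) ----------
theorem pvRowGo_nil (rs : List Int) (d l : Int) : pvRowGo rs [] d l = [] := by
  cases rs <;> rfl

theorem pvRowGo_length : ∀ (ps rs : List Int) (d l : Int), ps.length ≤ rs.length →
    (pvRowGo rs ps d l).length = ps.length := by
  intro ps
  induction ps with
  | nil => intro rs d l _; cases rs <;> simp [pvRowGo]
  | cons p ps ih =>
      intro rs d l h
      cases rs with
      | nil => simp at h
      | cons c rs => simp [pvRowGo]; exact ih rs p _ (by simpa using h)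

theorem pvRowGo_nonneg : ∀ (ps rs : List Int) (d l : Int),
    (∀ x ∈ ps, 0 ≤ x) → 0 ≤ d → 0 ≤ l → ∀ x ∈ pvRowGo rs ps d l, 0 ≤ x := by
  intro ps
  induction ps with
  | nil => intro rs d l _ _ _ x hx; cases rs <;> simp [pvRowGo] at hx
  | cons p ps ih =>
      intro rs d l hps hd hl x hx
      cases rs with
      | nil => simp [pvRowGo] at hx
      | cons c rs =>
          have hp : 0 ≤ p := hps p (by simp)
          have hv : 0 ≤ (if c == 1 then min (min p l) d + 1 else 0 : Int) := by
            split
            · have : (0:Int) ≤ min (min p l) d := le_min (le_min hp hl) hd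
              omega
            · omega
          simp only [pvRowGo, List.mem_cons] at hx
          rcases hx with rfl | hx
          · exact hv
          · exact ih rs p _ (fun y hy => hps y (by simp [hy])) hp hv x hx

theorem pvRowFn_length (row prev : List Int) (h : prev.length ≤ row.length) :
    (pvRowFn row prev).length = prev.length := by
  cases prev with
  | nil => cases row <;> simp [pvRowFn]
  | cons p ps =>
      cases row with
      | nil => simp at h
      | cons c rs => simp [pvRowFn]; exact pvRowGo_length ps rs p _ (by simpa using h)

theorem pvRowFn_nonneg (row prev : List Int) (h : ∀ x ∈ prev, 0 ≤ x) :
    ∀ x ∈ pvRowFn row prev, 0 ≤ x := by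
  cases prev with
  | nil => cases row <;> simp [pvRowFn]
  | cons p ps =>
      cases row with
      | nil => simp [pvRowFn]
      | cons c rs =>
          intro x hx
          simp only [pvRowFn, List.mem_cons] at hx
          rcases hx with rfl | hx
          · exact pvBit_nonneg c
          · exact pvRowGo_nonneg ps rs p (pvBit c) (fun y hy => h y (by simp [hy]))
              (h p (by simp)) (pvBit_nonneg c) x hx

theorem pvInnerA (matrix : List (List Int)) (D₀ Zs : List (List Int)) :
    ∀ (prest p₀ done₀ : List Int) (pd left m : Int),
    p₀.length = done₀.length →
    done₀.length + 1 + prest.length ≤ (matrix.getD (D₀.length + 1) []).length →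
    (∀ x ∈ prest, 0 ≤ x) → 0 ≤ pd → 0 ≤ left → 0 ≤ m →
    (List.range' (done₀.length + 1) prest.length).foldl (pvStepA matrix (D₀.length + 1))
        (D₀ ++ (p₀ ++ pd :: prest) :: (done₀ ++ left :: List.replicate prest.length 0) :: Zs, m)
      = (D₀ ++ (p₀ ++ pd :: prest) ::
           (done₀ ++ left :: pvRowGo ((matrix.getD (D₀.length + 1) []).drop (done₀.length + 1)) prest pd left) :: Zs,
         (pvRowGo ((matrix.getD (D₀.length + 1) []).drop (done₀.length + 1)) prest pd left).foldl max m) := by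
  intro prest
  induction prest with
  | nil => intro p₀ done₀ pd left m _ _ _ _ _ _; simp [pvRowGo_nil]
  | cons p ps ih =>
      intro p₀ done₀ pd left m hp₀ hlen hnn hpd hl hm
      simp only [List.length_cons] at hlen ⊢
      have hlt : done₀.length + 1 < (matrix.getD (D₀.length + 1) []).length := by omega
      have hrow : (matrix.getD (D₀.length + 1) []).drop (done₀.length + 1)
          = (matrix.getD (D₀.length + 1) []).getD (done₀.length + 1) 0 ::
            (matrix.getD (D₀.length + 1) []).drop (done₀.length + 1 + 1) := pvDrop_cons hlt
      have hp : 0 ≤ p := hnn p (by simp)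
      have hgi : (D₀ ++ (p₀ ++ pd :: p :: ps) :: (done₀ ++ left :: List.replicate (ps.length + 1) 0) :: Zs).getD
          (D₀.length + 1) [] = done₀ ++ left :: List.replicate (ps.length + 1) 0 := by
        rw [pvGetD_append_len D₀ _ 1]; rfl
      have hgi1 : (D₀ ++ (p₀ ++ pd :: p :: ps) :: (done₀ ++ left :: List.replicate (ps.length + 1) 0) :: Zs).getD
          (D₀.length + 1 - 1) [] = p₀ ++ pd :: p :: ps := by
        simp only [Nat.add_sub_cancel]
        rw [pvGetD_append_self]; rfl
      have hPj : (p₀ ++ pd :: p :: ps).getD (done₀.length + 1) 0 = p := by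
        rw [← hp₀, pvGetD_append_len p₀ _ 1]; rfl
      have hPj1 : (p₀ ++ pd :: p :: ps).getD (done₀.length + 1 - 1) 0 = pd := by
        simp only [Nat.add_sub_cancel]
        rw [← hp₀, pvGetD_append_self]; rfl
      have hcur1 : (done₀ ++ left :: List.replicate (ps.length + 1) 0).getD (done₀.length + 1 - 1) 0 = left := by
        simp only [Nat.add_sub_cancel]
        rw [pvGetD_append_self]; rfl
      rw [List.range'_succ]
      simp only [List.foldl_cons]
      by_cases hc : (matrix.getD (D₀.length + 1) []).getD (done₀.length + 1) 0 = 1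
      · have hv0 : (0:Int) ≤ min (min p left) pd := le_min (le_min hp hl) hpd
        have hstep : pvStepA matrix (D₀.length + 1)
            (D₀ ++ (p₀ ++ pd :: p :: ps) :: (done₀ ++ left :: List.replicate (ps.length + 1) 0) :: Zs, m)
            (done₀.length + 1)
            = (D₀ ++ (p₀ ++ pd :: p :: ps) ::
                 ((done₀ ++ [left]) ++ (min (min p left) pd + 1) :: List.replicate ps.length 0) :: Zs,
               max m (min (min p left) pd + 1)) := by
          unfold pvStepA
          simp only [hgi, hgi1, hPj, hPj1, hcur1, hc, beq_self_eq_true, if_true]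
          rw [if_neg (by simp)]
          rw [pvSet_append_len done₀ _ 1, pvSet_append_len D₀ _ 1]
          simp [List.set, List.replicate]
        rw [hstep]
        have h := ih (p₀ ++ [pd]) (done₀ ++ [left]) p (min (min p left) pd + 1)
          (max m (min (min p left) pd + 1))
          (by simp [hp₀])
          (by simp only [List.length_append, List.length_cons, List.length_nil,
                List.getD_eq_getElem?_getD] at hlen ⊢; omega)
          (fun x hx => hnn x (by simp [hx])) hp (by omega)
          (le_trans hm (le_max_left _ _))
        simp only [List.length_append, List.length_cons, List.length_nil, List.append_assoc,
          List.cons_append, List.nil_append] at h ⊢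
        rw [h, hrow]
        simp only [pvRowGo, hc, beq_self_eq_true, if_true]
        simp [List.foldl_cons]
      · have hstep : pvStepA matrix (D₀.length + 1)
            (D₀ ++ (p₀ ++ pd :: p :: ps) :: (done₀ ++ left :: List.replicate (ps.length + 1) 0) :: Zs, m)
            (done₀.length + 1)
            = (D₀ ++ (p₀ ++ pd :: p :: ps) ::
                 ((done₀ ++ [left]) ++ (0:Int) :: List.replicate ps.length 0) :: Zs, m) := by
          unfold pvStepA
          rw [if_neg (by simpa using hc)]
          simp [List.replicate]
        rw [hstep]
        have h := ih (p₀ ++ [pd]) (done₀ ++ [left]) p 0 m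
          (by simp [hp₀])
          (by simp only [List.length_append, List.length_cons, List.length_nil,
                List.getD_eq_getElem?_getD] at hlen ⊢; omega)
          (fun x hx => hnn x (by simp [hx])) hp le_rfl hm
        simp only [List.length_append, List.length_cons, List.length_nil, List.append_assoc,
          List.cons_append, List.nil_append] at h ⊢
        rw [h, hrow]
        simp only [pvRowGo]
        rw [if_neg (by simpa using hc)]
        simp [List.foldl_cons, max_eq_left hm]

theorem pvRowALem (matrix : List (List Int)) (D₀ Zs : List (List Int)) (prev : List Int) (m : Int)
    (hne : prev ≠ []) (hlen : prev.length ≤ (matrix.getD (D₀.length + 1) []).length)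
    (hnn : ∀ x ∈ prev, 0 ≤ x) (hm : 0 ≤ m) :
    pvRowA matrix prev.length (D₀ ++ prev :: List.replicate prev.length 0 :: Zs, m) (D₀.length + 1)
      = (D₀ ++ prev :: pvRowFn (matrix.getD (D₀.length + 1) []) prev :: Zs,
         (pvRowFn (matrix.getD (D₀.length + 1) []) prev).foldl max m) := by
  obtain ⟨p, ps, rfl⟩ : ∃ p ps, prev = p :: ps := by
    cases prev with
    | nil => exact absurd rfl hne
    | cons p ps => exact ⟨p, ps, rfl⟩
  have hp : 0 ≤ p := hnn p (by simp)
  have h0lt : 0 < (matrix.getD (D₀.length + 1) []).length := by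
    simp only [List.length_cons, List.getD_eq_getElem?_getD] at hlen ⊢; omega
  have hrow : matrix.getD (D₀.length + 1) []
      = (matrix.getD (D₀.length + 1) []).getD 0 0 :: (matrix.getD (D₀.length + 1) []).drop 1 := by
    have := pvDrop_cons h0lt
    simpa using this
  unfold pvRowA
  simp only [List.length_cons, List.range_eq_range', List.range'_succ, List.foldl_cons]
  have hstep : pvStepA matrix (D₀.length + 1)
      (D₀ ++ (p :: ps) :: List.replicate (ps.length + 1) 0 :: Zs, m) 0
      = (D₀ ++ (p :: ps) ::
           (([] : List Int) ++ pvBit ((matrix.getD (D₀.length + 1) []).getD 0 0) :: List.replicate ps.length 0) :: Zs,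
         max m (pvBit ((matrix.getD (D₀.length + 1) []).getD 0 0))) := by
    unfold pvStepA pvBit
    by_cases hc : (matrix.getD (D₀.length + 1) []).getD 0 0 = 1
    · simp only [hc, beq_self_eq_true, if_true, or_true]
      have hgi : (D₀ ++ (p :: ps) :: List.replicate (ps.length + 1) 0 :: Zs).getD
          (D₀.length + 1) [] = List.replicate (ps.length + 1) 0 := by
        rw [pvGetD_append_len D₀ _ 1]; rfl
      rw [hgi, pvSet_append_len D₀ _ 1]
      simp [List.set, List.replicate]
    · rw [if_neg (by simpa using hc), if_neg (by simpa using hc)]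
      simp [List.replicate, max_eq_left hm]
  rw [hstep]
  have h := pvInnerA matrix D₀ Zs ps [] []
    p (pvBit ((matrix.getD (D₀.length + 1) []).getD 0 0))
    (max m (pvBit ((matrix.getD (D₀.length + 1) []).getD 0 0)))
    rfl (by simp only [List.length_nil, List.length_cons,
          List.getD_eq_getElem?_getD] at hlen ⊢; omega)
    (fun x hx => hnn x (by simp [hx])) hp
    (pvBit_nonneg _) (le_trans hm (le_max_left _ _))
  simp only [List.length_nil, List.nil_append] at h ⊢
  rw [h]
  rw [Prod.mk.injEq]
  constructor
  · rw [hrow]; simp [pvRowFn]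
  · conv_rhs => rw [hrow]
    simp [pvRowFn, List.foldl_cons]

theorem pvInnerA0 (matrix : List (List Int)) (Zs : List (List Int)) :
    ∀ (n : Nat) (done₀ : List Int) (m : Int),
    done₀.length + n ≤ (matrix.getD 0 []).length → 0 ≤ m →
    (List.range' done₀.length n).foldl (pvStepA matrix 0) ((done₀ ++ List.replicate n 0) :: Zs, m)
      = ((done₀ ++ (((matrix.getD 0 []).drop done₀.length).take n).map pvBit) :: Zs,
         ((((matrix.getD 0 []).drop done₀.length).take n).map pvBit).foldl max m) := by
  intro n
  induction n with
  | zero => intro done₀ m _ _; simp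
  | succ k ih =>
      intro done₀ m hlen hm
      have hlt : done₀.length < (matrix.getD 0 []).length := by omega
      have hrow : (matrix.getD 0 []).drop done₀.length
          = (matrix.getD 0 []).getD done₀.length 0 :: (matrix.getD 0 []).drop (done₀.length + 1) :=
        pvDrop_cons hlt
      rw [List.range'_succ]
      simp only [List.foldl_cons]
      have hstep : pvStepA matrix 0 ((done₀ ++ List.replicate (k+1) 0) :: Zs, m) done₀.length
          = (((done₀ ++ [pvBit ((matrix.getD 0 []).getD done₀.length 0)]) ++ List.replicate k 0) :: Zs,
             max m (pvBit ((matrix.getD 0 []).getD done₀.length 0))) := by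
        unfold pvStepA pvBit
        by_cases hc : (matrix.getD 0 []).getD done₀.length 0 = 1
        · simp only [hc, beq_self_eq_true, if_true, true_or, List.getD, List.set,
            List.getElem?_cons_zero, Option.getD_some, List.replicate]
          rw [pvSet_append_self done₀]
          simp only [List.getD_eq_getElem?_getD] at hc
          simp [List.set, hc]
        · rw [if_neg (by simpa using hc), if_neg (by simpa using hc)]
          simp [List.replicate, max_eq_left hm]
      rw [hstep]
      have h := ih (done₀ ++ [pvBit ((matrix.getD 0 []).getD done₀.length 0)])
        (max m (pvBit ((matrix.getD 0 []).getD done₀.length 0)))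
        (by simp only [List.length_append, List.length_cons, List.length_nil]; omega)
        (le_trans hm (le_max_left _ _))
      simp only [List.length_append, List.length_cons, List.length_nil] at h
      rw [h, hrow]
      simp [List.foldl_cons]

theorem pvOuterA (matrix : List (List Int)) (cols : Nat) :
    ∀ (k : Nat) (D₀ : List (List Int)) (prev : List Int) (m : Int),
    cols = prev.length → prev ≠ [] →
    (∀ r ∈ matrix.drop (D₀.length + 1), cols ≤ r.length) →
    D₀.length + 1 + k = matrix.length →
    (∀ x ∈ prev, 0 ≤ x) → 0 ≤ m →
    ((List.range' (D₀.length + 1) k).foldl (pvRowA matrix cols)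
        (D₀ ++ prev :: List.replicate k (List.replicate cols 0), m)).2
      = pvSpecRows (matrix.drop (D₀.length + 1)) prev m := by
  intro k
  induction k with
  | zero =>
      intro D₀ prev m _ _ _ hk _ _
      have hdrop : matrix.drop (D₀.length + 1) = [] := by
        apply List.drop_eq_nil_of_le
        omega
      simp [hdrop, pvSpecRows]
  | succ k ih =>
      intro D₀ prev m hcols hne hlens hk hnn hm
      have hilt : D₀.length + 1 < matrix.length := by omega
      have hget : matrix.getD (D₀.length + 1) [] = matrix[D₀.length + 1] := by
        simp [List.getD_eq_getElem?_getD, List.getElem?_eq_getElem hilt]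
      have hdrop : matrix.drop (D₀.length + 1)
          = matrix.getD (D₀.length + 1) [] :: matrix.drop (D₀.length + 1 + 1) := by
        rw [hget]; exact List.drop_eq_getElem_cons hilt
      have hrlen : prev.length ≤ (matrix.getD (D₀.length + 1) []).length := by
        rw [← hcols]
        exact hlens _ (by rw [hdrop]; simp)
      rw [List.range'_succ]
      simp only [List.foldl_cons, List.replicate]
      rw [hcols, pvRowALem matrix D₀ (List.replicate k (List.replicate prev.length 0)) prev m
        hne hrlen hnn hm]
      have hfl : (pvRowFn (matrix.getD (D₀.length + 1) []) prev).length = prev.length :=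
        pvRowFn_length _ prev hrlen
      have h := ih (D₀ ++ [prev]) (pvRowFn (matrix.getD (D₀.length + 1) []) prev)
        ((pvRowFn (matrix.getD (D₀.length + 1) []) prev).foldl max m)
        (by rw [hfl, hcols])
        (by
          intro he
          rw [he] at hfl
          cases prev with
          | nil => exact hne rfl
          | cons a b => simp at hfl)
        (by
          intro r hr
          refine hlens r ?_
          rw [hdrop]
          simp only [List.length_append, List.length_cons, List.length_nil] at hr
          simp [hr])
        (by simp; omega)
        (pvRowFn_nonneg _ prev hnn) (pvFoldlMax_nonneg _ _ hm)
      simp only [List.length_append, List.length_cons, List.length_nil, List.append_assoc,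
        List.cons_append, List.nil_append, hcols] at h ⊢
      rw [h, hdrop]
      simp [pvSpecRows]

theorem pvMapBit_nonneg (l : List Int) : ∀ x ∈ l.map pvBit, 0 ≤ x := by
  intro x hx
  simp only [List.mem_map] at hx
  obtain ⟨c, _, rfl⟩ := hx
  exact pvBit_nonneg c

-- ---------- bridge: A's DP rows compute pvF ----------
theorem pvRowGo_f (m : List (List Int)) (cols i : Nat) (hrow : cols ≤ (m.getD (i+1) []).length) :
    ∀ (n j : Nat), j + 1 + n ≤ cols →
      pvRowGo ((m.getD (i+1) []).drop (j+1))
        ((List.range' (j+1) n).map (fun y => (pvF m i y : Int)))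
        ((pvF m i j : Int)) ((pvF m (i+1) j : Int))
      = (List.range' (j+1) n).map (fun y => (pvF m (i+1) y : Int)) := by
  intro n
  induction n with
  | zero => intro j _; simp [pvRowGo_nil]
  | succ n ih =>
      intro j hjn
      have hlt : j + 1 < (m.getD (i+1) []).length := by omega
      have hdrop : (m.getD (i+1) []).drop (j+1)
          = (m.getD (i+1) []).getD (j+1) 0 :: (m.getD (i+1) []).drop (j+2) := pvDrop_cons hlt
      rw [hdrop, List.range'_succ]
      simp only [List.map_cons]
      have hcell : (m.getD (i+1) []).getD (j+1) 0 = pvCell m (i+1) (j+1) := rfl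
      have hval : (if (m.getD (i+1) []).getD (j+1) 0 == 1 then
            min (min ((pvF m i (j+1) : Int)) ((pvF m (i+1) j : Int))) ((pvF m i j : Int)) + 1
          else 0) = (pvF m (i+1) (j+1) : Int) := by
        rw [hcell, pvF_succ m i j]
        by_cases hc : pvCell m (i+1) (j+1) = 1
        · rw [if_pos hc, if_pos (by simpa using hc)]
          push_cast
          rfl
        · rw [if_neg hc, if_neg (by simpa using hc)]
          rfl
      rw [pvRowGo, hval]
      congr 1
      have := ih (j+1) (by omega)
      rw [show j+1+1 = j+2 from rfl] at this
      exact this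

theorem pvRowFn_f (m : List (List Int)) (cols i : Nat) (hc : 1 ≤ cols)
    (hrow : cols ≤ (m.getD (i+1) []).length) :
    pvRowFn (m.getD (i+1) []) ((List.range cols).map (fun y => (pvF m i y : Int)))
      = (List.range cols).map (fun y => (pvF m (i+1) y : Int)) := by
  obtain ⟨c', rfl⟩ : ∃ c', cols = c' + 1 := ⟨cols - 1, by omega⟩
  have hne : 0 < (m.getD (i+1) []).length := by omega
  have hdrop : m.getD (i+1) [] = (m.getD (i+1) []).getD 0 0 :: (m.getD (i+1) []).drop 1 := by
    simpa using pvDrop_cons hne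
  have hrange : List.range (c'+1) = 0 :: List.range' 1 c' := by
    rw [List.range_eq_range', List.range'_succ]
  rw [hrange]
  simp only [List.map_cons]
  conv_lhs => rw [hdrop]
  rw [pvRowFn]
  have hcell : (m.getD (i+1) []).getD 0 0 = pvCell m (i+1) 0 := rfl
  have hhead : pvBit ((m.getD (i+1) []).getD 0 0) = (pvF m (i+1) 0 : Int) := by
    rw [hcell]
    by_cases hc : pvCell m (i+1) 0 = 1
    · rw [pvF_edge m (i+1) 0 hc (Or.inr rfl)]
      simp [pvBit, hc]
    · rw [pvF_of_ne m (i+1) 0 hc]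
      simp only [pvBit]
      rw [if_neg (by simpa using hc)]
      rfl
  rw [hhead]
  congr 1
  have := pvRowGo_f m (c'+1) i (by omega) c' 0 (by omega)
  simpa using this

theorem pvRow0_f (row0 : List Int) (mrest : List (List Int)) :
    row0.map pvBit = (List.range row0.length).map (fun y => (pvF (row0 :: mrest) 0 y : Int)) := by
  apply List.ext_getElem
  · simp
  intro n h1 h2
  simp only [List.getElem_map, List.getElem_range]
  have hlen' : n < row0.length := by simpa using h1
  have hget : pvCell (row0 :: mrest) 0 n = row0[n]'hlen' := by
    simp only [pvCell, List.getD_eq_getElem?_getD]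
    simp [List.getElem?_eq_getElem hlen']
  by_cases hc : pvCell (row0 :: mrest) 0 n = 1
  · rw [pvF_edge _ 0 n hc (Or.inl rfl)]
    rw [hget] at hc
    simp [pvBit, hc]
  · rw [pvF_of_ne _ 0 n hc]
    rw [hget] at hc
    simp only [pvBit]
    rw [if_neg (by simpa using hc)]
    rfl

theorem pvSpecRows_pref (m : List (List Int)) (cols : Nat) (hc : 1 ≤ cols)
    (hlens : ∀ row ∈ m, cols ≤ row.length) :
    ∀ (rest : List (List Int)) (r : Nat), rest = m.drop (r+1) → r + 1 ≤ m.length →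
      pvSpecRows rest ((List.range cols).map (fun y => (pvF m r y : Int))) (pvPref m cols (r+1) 0)
        = pvPref m cols m.length 0 := by
  intro rest
  induction rest with
  | nil =>
      intro r hdrop hr1
      have hlen : m.length ≤ r + 1 := by
        by_contra hcon
        have := List.drop_eq_getElem_cons (l := m) (i := r+1) (by omega)
        rw [← hdrop] at this
        cases this
      have : m.length = r + 1 := by omega
      rw [this]
      rfl
  | cons row rest' ih =>
      intro r hdrop hr1
      have hlt : r + 1 < m.length := by
        by_contra hcon
        have : m.drop (r+1) = [] := List.drop_eq_nil_of_le (by omega)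
        rw [this] at hdrop
        cases hdrop
      have hcons := List.drop_eq_getElem_cons (l := m) (i := r+1) hlt
      rw [← hdrop] at hcons
      injection hcons with hhd htl
      have hrow : row = m.getD (r+1) [] := by
        rw [hhd]
        simp [List.getD_eq_getElem?_getD, List.getElem?_eq_getElem hlt]
      have hrest : rest' = m.drop (r+2) := htl
      have hmem : row ∈ m := by
        have : row ∈ m.drop (r+1) := by rw [← hdrop]; simp
        exact List.mem_of_mem_drop this
      simp only [pvSpecRows]
      rw [hrow, pvRowFn_f m cols r hc (by rw [← hrow]; exact hlens row hmem)]
      have hfold : ((List.range cols).map (fun y => (pvF m (r+1) y : Int))).foldl max (pvPref m cols (r+1) 0)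
          = pvPref m cols (r+2) 0 := by
        rw [List.range_eq_range']
        have := pvPref_fold m cols (r+1) cols 0
        simp only [Nat.zero_add] at this
        rw [this, ← pvPref_roll]
      rw [hfold]
      exact ih (r+1) hrest (by omega)

-- ===== VERDICT (by name: the statement is the Claim_ definition above) =====
theorem largest_square_submatrix_spec : Claim_equal_largest_square_submatrix := by
  intro matrix _ hpre
  unfold Spec_largest_square_submatrix
  unfold largest_square_submatrix largest_square_submatrix_alt
  by_cases hg : matrix = [] ∨ matrix.headD [] = []
  · rw [if_pos hg, if_pos hg]
  · rw [if_neg hg, if_neg hg]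
    push_neg at hg
    obtain ⟨hmne, hhne⟩ := hg
    obtain ⟨row0, mrest, rfl⟩ : ∃ r rs, matrix = r :: rs := by
      cases matrix with
      | nil => exact absurd rfl hmne
      | cons r rs => exact ⟨r, rs, rfl⟩
    have hhd : (row0 :: mrest).headD ([] : List Int) = row0 := rfl
    rw [hhd] at hhne ⊢
    have hcolpos : 0 < row0.length := by
      cases row0 with
      | nil => exact absurd rfl hhne
      | cons a b => simp
    have hpre' : ∀ r ∈ row0 :: mrest, row0.length ≤ r.length := by
      intro r hr; simpa using hpre r hr
    -- A side: the DP fold computes pvSpecRows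
    have hA : (((List.range (row0 :: mrest).length).foldl (pvRowA (row0 :: mrest) row0.length)
        (List.replicate (row0 :: mrest).length (List.replicate row0.length 0), 0)).2 : Int)
        = pvSpecRows mrest (row0.map pvBit) ((row0.map pvBit).foldl max 0) := by
      simp only [List.length_cons, List.range_eq_range', List.range'_succ, List.foldl_cons,
        List.replicate]
      have h0 : pvRowA (row0 :: mrest) row0.length
          (List.replicate row0.length 0 :: List.replicate mrest.length (List.replicate row0.length 0), 0) 0
          = ((row0.map pvBit) :: List.replicate mrest.length (List.replicate row0.length 0),
             (row0.map pvBit).foldl max 0) := by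
        unfold pvRowA
        have h := pvInnerA0 (row0 :: mrest) (List.replicate mrest.length (List.replicate row0.length 0))
          row0.length [] 0 (by simp [List.getD]) le_rfl
        simp only [List.length_nil, List.nil_append, List.range_eq_range'] at h ⊢
        rw [h]
        simp [List.getD]
      rw [h0]
      have h := pvOuterA (row0 :: mrest) row0.length mrest.length [] (row0.map pvBit)
        ((row0.map pvBit).foldl max 0)
        (by simp) (by simp [hhne])
        (by intro r hr; simp at hr; exact hpre' r (by simp [hr]))
        (by simp only [List.length_nil, List.length_cons]; omega)
        (pvMapBit_nonneg row0) (pvFoldlMax_nonneg _ _ le_rfl)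
      simp only [List.length_nil, List.nil_append] at h
      rw [h]
      simp
    -- bridge: row 0 of the DP is pvF at row 0
    have hrow0 : row0.map pvBit
        = (List.range row0.length).map (fun y => (pvF (row0::mrest) 0 y : Int)) :=
      pvRow0_f row0 mrest
    have hacc : ((List.range row0.length).map (fun y => (pvF (row0::mrest) 0 y : Int))).foldl max 0
        = pvPref (row0::mrest) row0.length 1 0 := by
      rw [List.range_eq_range']
      have h0 := pvPref_fold (row0::mrest) row0.length 0 row0.length 0
      simp only [Nat.zero_add] at h0
      rw [pvPref_zero] at h0
      rw [h0, ← pvPref_roll]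
    have hspec : pvSpecRows mrest ((List.range row0.length).map (fun y => (pvF (row0::mrest) 0 y : Int)))
          (pvPref (row0::mrest) row0.length 1 0)
        = pvPref (row0::mrest) row0.length (row0::mrest).length 0 :=
      pvSpecRows_pref (row0::mrest) row0.length (by omega) hpre' mrest 0 rfl (by simp)
    -- B side: the scan computes the same prefix maximum
    have hB : (List.range (row0::mrest).length).foldl
        (fun best i => (List.range row0.length).foldl
          (pvStepScan (pvBuildS (row0::mrest) (row0::mrest).length row0.length) i) best) 0
        = pvPref (row0::mrest) row0.length (row0::mrest).length 0 := by
      have h := pvScanAll (row0::mrest) (row0::mrest).length row0.length (row0::mrest).length 0 (by omega)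
      simp only [Nat.zero_add] at h
      rw [pvPref_zero, ← List.range_eq_range'] at h
      exact h
    rw [hA, hrow0, hacc, hspec, hB]
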